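-- pv_equiv track=rewrite | github.com/posl/comment_recommendation | script/split_gen/1_time/zh/099_C/2.py | solve
-- ===== SOURCE A (Python) =====
-- def solve(n):
--     # 用来计算最小的次数
--     ans = n
--     # 9的次数
--     i = 0
--     while 9 ** i <= n:
--         # 6的次数
--         j = 0
--         while 9 ** i + 6 ** j <= n:
--             # 取最小值
--             ans = min(ans, n - (9 ** i + 6 ** j) + i + j)
--             j += 1
--         i += 1
--     return ans
-- ===== SOURCE B (Python) =====
-- def solve(n):
--     # Two-pointer endpoint scan: for each power of 9 only the largest power of 6
--     # that still fits matters (the objective strictly decreases in j).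
--     ans = n
--     six = []          # powers of 6 not exceeding n, increasing
--     p = 1
--     while p <= n:
--         six.append(p)
--         p *= 6
--     j = len(six) - 1  # pointer only moves down: n - p9 decreases with i
--     p9 = 1
--     i = 0
--     while p9 <= n:
--         r = n - p9
--         while j >= 0 and six[j] > r:
--             j -= 1
--         if j >= 0:
--             ans = min(ans, r - six[j] + i + j)
--         p9 *= 9
--         i += 1
--     return ans
-- ===== Notes on version B (the rewrite author's own statement) =====
-- stated objective: faster
-- what changed: Replaces the nested min-scan over all pairs (i,j) by a two-pointer scan: the objective strictly decreases in j, so for each power of 9 only the largest fitting power of 6 (tracked by a monotone pointer into a precomputed list) is examined.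
import Mathlib
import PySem

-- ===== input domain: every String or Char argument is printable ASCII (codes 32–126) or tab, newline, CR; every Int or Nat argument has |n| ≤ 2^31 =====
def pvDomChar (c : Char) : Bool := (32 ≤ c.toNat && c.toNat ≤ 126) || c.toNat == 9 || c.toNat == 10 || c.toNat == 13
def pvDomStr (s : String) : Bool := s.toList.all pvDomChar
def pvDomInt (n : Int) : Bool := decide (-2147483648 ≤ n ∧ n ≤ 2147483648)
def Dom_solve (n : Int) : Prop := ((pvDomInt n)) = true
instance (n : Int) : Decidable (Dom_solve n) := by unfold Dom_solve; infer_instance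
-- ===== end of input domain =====

-- B replaces A's nested min-scan over all (i,j) pairs by a two-pointer scan that
-- examines, for each power of 9, only the largest fitting power of 6 (faster).
-- All loops are ported with a fuel counter as a totality guard; fuel (n+2) is
-- enough for every loop (each runs at most log(n)+2 times), so behaviour matches.

-- ===== PORT A =====
-- inner while loop of A: j scans upward, taking the min over every candidate
def solveInner (n : Int) (i : Nat) : (fuel j : Nat) → (ans : Int) → Int
  | 0, _, ans => ans
  | fuel+1, j, ans =>
    if (9:Int)^i + 6^j ≤ n then
      solveInner n i fuel (j+1) (min ans (n - ((9:Int)^i + 6^j) + i + j))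
    else ans

-- outer while loop of A: i scans upward
def solveOuter (n : Int) : (fuel : Nat) → (i : Nat) → (ans : Int) → Int
  | 0, _, ans => ans
  | fuel+1, i, ans =>
    if (9:Int)^i ≤ n then solveOuter n fuel (i+1) (solveInner n i (n+2).toNat 0 ans)
    else ans

def solve (n : Int) : Int := solveOuter n (n+2).toNat 0 n

-- ===== PORT B =====
-- Source B's first while loop: powers of 6 not exceeding n, increasing
def buildSix (n : Int) : (fuel : Nat) → (p : Int) → List Int
  | 0, _ => []
  | fuel+1, p => if p ≤ n then p :: buildSix n fuel (p * 6) else []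

-- Source B's inner while loop: move the pointer j down while six[j] > r
def innerB (six : List Int) (r : Int) : (fuel : Nat) → (j : Int) → Int
  | 0, j => j
  | fuel+1, j => if 0 ≤ j ∧ r < six.getD j.toNat 0 then innerB six r fuel (j - 1) else j

-- Source B's outer while loop: running product p9, one candidate at the pointer
def outerB (n : Int) (six : List Int) : (fuel : Nat) → (p : Int) → (i : Nat) → (j ans : Int) → Int
  | 0, _, _, _, ans => ans
  | fuel+1, p, i, j, ans =>
    if p ≤ n then
      let r := n - p
      let j' := innerB six r (j+2).toNat j
      let ans' := if 0 ≤ j' then min ans (r - six.getD j'.toNat 0 + i + j') else ans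
      outerB n six fuel (p * 9) (i + 1) j' ans'
    else ans

def solve_alt (n : Int) : Int :=
  let six := buildSix n (n+2).toNat 1
  outerB n six (n+2).toNat 1 0 ((six.length : Int) - 1) n

-- ===== PRECONDITION & SPEC =====
def Spec_solve (n : Int) (out : Int) : Prop := out = solve_alt n
instance (n : Int) (out : Int) : Decidable (Spec_solve n out) := by unfold Spec_solve; infer_instance

-- ===== CLAIM (what is proved, stated in full; the proofs are below) =====
def Claim_equal_solve : Prop := ∀ (n : Int), Dom_solve n → Spec_solve n (solve n)

-- ===== LEMMAS AND PROOFS =====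

-- the objective of both programs at exponents i, j
def pvF (n : Int) (i j : Nat) : Int := n - ((9:Int)^i + 6^j) + i + j

-- largest exponent j with 6^j ≤ r (meaningful for 1 ≤ r)
def pvJr (r : Int) : Nat := Nat.log 6 r.toNat

-- the pointer value B's inner loop reaches for remainder r (-1 when no power of 6 fits)
def pvJrI (r : Int) : Int := if 1 ≤ r then (pvJr r : Int) else -1

-- the best candidate for a fixed i, folded into ans
def pvCand (n : Int) (i : Nat) (ans : Int) : Int :=
  if 1 ≤ n - (9:Int)^i then min ans (pvF n i (pvJr (n - 9^i))) else ans

-- common reference: fold pvCand over all i with 9^i ≤ n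
def pvBest (n : Int) (i : Nat) (ans : Int) : Int :=
  if h : (9:Int)^i ≤ n then pvBest n (i+1) (pvCand n i ans) else ans
termination_by (n + 1 - (9:Int)^i).toNat
decreasing_by
  have h1 : (1:Int) ≤ 9^i := one_le_pow₀ (by norm_num)
  omega

lemma pvJr_le (r : Int) (hr : 1 ≤ r) : (6:Int)^(pvJr r) ≤ r := by
  have h0 : r.toNat ≠ 0 := by omega
  have h := Nat.pow_log_le_self 6 h0
  have h' : (((6:Nat)^(pvJr r) : Nat) : Int) ≤ (r.toNat : Int) := by exact_mod_cast h
  push_cast at h'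
  omega

lemma pvJr_lt_succ (r : Int) (hr : 1 ≤ r) : r < (6:Int)^(pvJr r + 1) := by
  have h := Nat.lt_pow_succ_log_self (by norm_num : 1 < 6) r.toNat
  have h' : (r.toNat : Int) < (((6:Nat)^(Nat.log 6 r.toNat + 1) : Nat) : Int) := by exact_mod_cast h
  push_cast at h'
  unfold pvJr
  omega

lemma pvJr_mono {r r' : Int} (h : r' ≤ r) : pvJr r' ≤ pvJr r := by
  unfold pvJr
  exact Nat.log_mono_right (by omega)

lemma pvJrI_mono {r r' : Int} (h : r' ≤ r) : pvJrI r' ≤ pvJrI r := by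
  unfold pvJrI
  split_ifs with h1 h2
  · exact_mod_cast pvJr_mono h
  · omega
  · omega
  · exact le_refl _

lemma pvF_anti (n : Int) (i : Nat) {j j' : Nat} (h : j ≤ j') : pvF n i j' ≤ pvF n i j := by
  induction j', h using Nat.le_induction with
  | base => exact le_refl _
  | succ m hm ih =>
    refine le_trans ?_ ih
    unfold pvF
    have h1 : (1:Int) ≤ 6^m := one_le_pow₀ (by norm_num)
    have h2 : (6:Int)^(m+1) = 6^m * 6 := by rw [pow_succ]
    push_cast
    omega

lemma pvSelfLt : ∀ k : Nat, (k:Int) < 6^k := by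
  intro k
  induction k with
  | zero => norm_num
  | succ k ih =>
    have h1 : (1:Int) ≤ 6^k := one_le_pow₀ (by norm_num)
    have h2 : (6:Int)^(k+1) = 6^k * 6 := by rw [pow_succ]
    push_cast
    omega

lemma innerA_eval (n : Int) (i J : Nat) (hJ1 : (6:Int)^J ≤ n - 9^i)
    (hJ2 : n - (9:Int)^i < 6^(J+1)) :
    ∀ fuel j ans, j ≤ J → J + 2 - j ≤ fuel → solveInner n i fuel j ans = min ans (pvF n i J) := by
  intro fuel
  induction fuel with
  | zero =>
    intro j ans hj hf
    omega
  | succ fuel ih =>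
    intro j ans hj hf
    by_cases hjJ : j = J
    · subst hjJ
      have hg : (9:Int)^i + 6^j ≤ n := by omega
      simp only [solveInner]
      rw [if_pos hg]
      obtain ⟨f', rfl⟩ : ∃ f', fuel = f' + 1 := ⟨fuel - 1, by omega⟩
      have hg2 : ¬ ((9:Int)^i + 6^(j+1) ≤ n) := by omega
      simp only [solveInner]
      rw [if_neg hg2]
      rfl
    · have hpow : (6:Int)^j ≤ 6^J := pow_le_pow_right₀ (by norm_num) (by omega)
      have hg : (9:Int)^i + 6^j ≤ n := by omega
      simp only [solveInner]
      rw [if_pos hg]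
      rw [ih (j+1) (min ans (n - ((9:Int)^i + 6^j) + i + j)) (by omega) (by omega)]
      have hle : pvF n i J ≤ pvF n i j := pvF_anti n i (by omega)
      have he : (n - ((9:Int)^i + 6^j) + i + j) = pvF n i j := rfl
      rw [he, min_assoc, min_eq_right hle]

lemma innerA_cand (n : Int) (i : Nat) (ans : Int) (hg9 : (9:Int)^i ≤ n) :
    solveInner n i (n+2).toNat 0 ans = pvCand n i ans := by
  have h9 : (1:Int) ≤ 9^i := one_le_pow₀ (by norm_num)
  unfold pvCand
  split_ifs with h
  · apply innerA_eval n i (pvJr (n - 9^i)) (pvJr_le _ h) (pvJr_lt_succ _ h) _ 0 ans (Nat.zero_le _)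
    have hp6 := pvJr_le (n - 9^i) h
    have hself := pvSelfLt (pvJr (n - 9^i))
    omega
  · obtain ⟨f, hf⟩ : ∃ f, (n+2).toNat = f + 1 := ⟨(n+2).toNat - 1, by omega⟩
    rw [hf]
    have hg : ¬ ((9:Int)^i + 6^0 ≤ n) := by simp only [pow_zero]; omega
    simp only [solveInner]
    rw [if_neg hg]

lemma outerA_eval (n : Int) : ∀ fuel i ans, (n + 1 - (9:Int)^i).toNat < fuel →
    solveOuter n fuel i ans = pvBest n i ans := by
  intro fuel
  induction fuel with
  | zero =>
    intro i ans hf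
    exact absurd hf (Nat.not_lt_zero _)
  | succ fuel ih =>
    intro i ans hf
    by_cases hg : (9:Int)^i ≤ n
    · simp only [solveOuter]
      rw [if_pos hg, innerA_cand n i ans hg, pvBest, dif_pos hg]
      apply ih
      have h1 : (1:Int) ≤ 9^i := one_le_pow₀ (by norm_num)
      have h2 : (9:Int)^(i+1) = 9^i * 9 := by rw [pow_succ]
      omega
    · simp only [solveOuter]
      rw [if_neg hg, pvBest, dif_neg hg]

lemma buildSix_getD (n : Int) : ∀ (fuel k : Nat) (p : Int), 0 < p →
    (n + 1 - p).toNat < fuel →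
    k < (buildSix n fuel p).length → (buildSix n fuel p).getD k 0 = p * 6^k := by
  intro fuel
  induction fuel with
  | zero =>
    intro k p hp hf hk
    exact absurd hf (Nat.not_lt_zero _)
  | succ fuel ih =>
    intro k p hp hf hk
    by_cases h : p ≤ n
    · simp only [buildSix] at hk ⊢
      rw [if_pos h] at hk ⊢
      cases k with
      | zero => simp
      | succ k =>
        simp only [List.getD_cons_succ, List.length_cons] at hk ⊢
        rw [ih k (p*6) (by omega) (by omega) (by omega)]
        rw [pow_succ]
        ring
    · simp only [buildSix] at hk
      rw [if_neg h] at hk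
      simp at hk

lemma buildSix_bounds (n : Int) : ∀ (fuel : Nat) (p : Int), 0 < p →
    (n + 1 - p).toNat < fuel → p ≤ n →
    p * 6^((buildSix n fuel p).length - 1) ≤ n ∧ n < p * 6^((buildSix n fuel p).length) := by
  intro fuel
  induction fuel with
  | zero =>
    intro p hp hf hpn
    exact absurd hf (Nat.not_lt_zero _)
  | succ fuel ih =>
    intro p hp hf hpn
    simp only [buildSix]
    rw [if_pos hpn]
    by_cases h : p * 6 ≤ n
    · obtain ⟨h1, h2⟩ := ih (p*6) (by omega) (by omega) h
      have hL' : 0 < (buildSix n fuel (p*6)).length := by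
        obtain ⟨f', rfl⟩ : ∃ f', fuel = f' + 1 := ⟨fuel - 1, by omega⟩
        simp only [buildSix]
        rw [if_pos h]
        simp
      simp only [List.length_cons]
      constructor
      · have he : p * 6^((buildSix n fuel (p*6)).length + 1 - 1)
            = (p*6) * 6^((buildSix n fuel (p*6)).length - 1) := by
          have h3 : (buildSix n fuel (p*6)).length + 1 - 1
              = ((buildSix n fuel (p*6)).length - 1) + 1 := by omega
          rw [h3, pow_succ]
          ring
        rw [he]
        exact h1
      · have he : p * 6^((buildSix n fuel (p*6)).length + 1)
            = (p*6) * 6^((buildSix n fuel (p*6)).length) := by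
          rw [pow_succ]
          ring
        rw [he]
        exact h2
    · have hnil : buildSix n fuel (p*6) = [] := by
        cases fuel with
        | zero => simp only [buildSix]
        | succ f => simp only [buildSix]; rw [if_neg h]
      rw [hnil]
      norm_num
      omega

lemma innerB_eval (six : List Int) (h6 : ∀ k, k < six.length → six.getD k 0 = (6:Int)^k)
    (r : Int) : ∀ (fuel : Nat) (j : Int), (j+2).toNat ≤ fuel → -1 ≤ j → j < (six.length : Int) →
    innerB six r fuel j = min j (pvJrI r) := by
  intro fuel
  induction fuel with
  | zero =>
    intro j hf h1 h2
    omega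
  | succ fuel ih =>
    intro j hf h1 h2
    by_cases hj0 : 0 ≤ j
    · have hget : six.getD j.toNat 0 = (6:Int)^(j.toNat) := h6 j.toNat (by omega)
      by_cases hcond : r < (6:Int)^(j.toNat)
      · simp only [innerB]
        rw [if_pos ⟨hj0, by rw [hget]; exact hcond⟩]
        rw [ih (j-1) (by omega) (by omega) (by omega)]
        have hJle : pvJrI r ≤ j - 1 := by
          unfold pvJrI
          split_ifs with hr
          · have hrn : r.toNat < 6^(j.toNat) := by
              have hc : (r.toNat : Int) < (((6:Nat)^(j.toNat) : Nat) : Int) := by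
                push_cast
                omega
              exact_mod_cast hc
            have hlog : Nat.log 6 r.toNat < j.toNat := Nat.log_lt_of_lt_pow (by omega) hrn
            unfold pvJr
            omega
          · omega
        omega
      · simp only [innerB]
        rw [if_neg (by rintro ⟨-, hc⟩; rw [hget] at hc; exact hcond hc)]
        have hr1 : (1:Int) ≤ r := le_trans (one_le_pow₀ (by norm_num)) (not_lt.mp hcond)
        have hjJ : j.toNat ≤ pvJr r := by
          have hpn : (6:Nat)^(j.toNat) ≤ r.toNat := by
            have hc : (((6:Nat)^(j.toNat) : Nat) : Int) ≤ (r.toNat : Int) := by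
              push_cast
              omega
            exact_mod_cast hc
          exact (Nat.le_log_iff_pow_le (by norm_num) (by omega)).mpr hpn
        unfold pvJrI
        rw [if_pos hr1]
        omega
    · have hj : j = -1 := by omega
      subst hj
      simp only [innerB]
      rw [if_neg (by omega : ¬ (0 ≤ (-1:Int) ∧ r < six.getD (-1:Int).toNat 0))]
      have hge : -1 ≤ pvJrI r := by
        unfold pvJrI
        split_ifs
        · omega
        · exact le_refl _
      omega

lemma outerB_eval (n : Int) (six : List Int)
    (h6 : ∀ k, k < six.length → six.getD k 0 = (6:Int)^k)
    (hlen : ∀ r : Int, r ≤ n - 1 → 1 ≤ r → pvJr r < six.length) :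
    ∀ (fuel : Nat) (p : Int) (i : Nat) (j ans : Int), (n + 1 - p).toNat < fuel →
    p = (9:Int)^i → -1 ≤ j → j < (six.length : Int) → pvJrI (n - p) ≤ j →
    outerB n six fuel p i j ans = pvBest n i ans := by
  intro fuel
  induction fuel with
  | zero =>
    intro p i j ans hf hp9 h1 h2 hinv
    exact absurd hf (Nat.not_lt_zero _)
  | succ fuel ih =>
    intro p i j ans hf hp9 h1 h2 hinv
    have hp : (0:Int) < p := by rw [hp9]; positivity
    by_cases hg : p ≤ n
    · simp only [outerB]
      rw [if_pos hg]
      have hj' : innerB six (n - p) (j+2).toNat j = pvJrI (n - p) := by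
        rw [innerB_eval six h6 (n - p) (j+2).toNat j le_rfl h1 h2]
        exact min_eq_right hinv
      simp only [hj']
      have hrlt : n - p ≤ n - 1 := by omega
      have hmeas : (n + 1 - p * 9).toNat < fuel := by omega
      have hnext9 : p * 9 = (9:Int)^(i+1) := by rw [hp9, pow_succ]
      have hmono : pvJrI (n - p * 9) ≤ pvJrI (n - p) := pvJrI_mono (by omega)
      by_cases hr : (1:Int) ≤ n - p
      · have hJval : pvJrI (n - p) = (pvJr (n - p) : Int) := by
          unfold pvJrI
          rw [if_pos hr]
        have hJlt : pvJr (n - p) < six.length := hlen (n - p) hrlt hr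
        rw [if_pos (by rw [hJval]; omega)]
        rw [show (pvJrI (n - p)).toNat = pvJr (n - p) by rw [hJval]; exact Int.toNat_natCast _]
        rw [h6 _ hJlt]
        rw [ih (p*9) (i+1) (pvJrI (n - p)) _ hmeas hnext9
          (by rw [hJval]; omega) (by rw [hJval]; exact_mod_cast hJlt) hmono]
        conv_rhs => rw [pvBest, dif_pos (by omega : (9:Int)^i ≤ n)]
        congr 1
        unfold pvCand pvF
        rw [if_pos (by omega : (1:Int) ≤ n - 9^i)]
        rw [hJval]
        rw [show n - (9:Int)^i = n - p by omega]
        omega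
      · have hJval : pvJrI (n - p) = -1 := by
          unfold pvJrI
          rw [if_neg hr]
        rw [if_neg (by rw [hJval]; omega)]
        rw [ih (p*9) (i+1) (pvJrI (n - p)) ans hmeas hnext9
          hJval.symm.le (by rw [hJval]; omega) hmono]
        conv_rhs => rw [pvBest, dif_pos (by omega : (9:Int)^i ≤ n)]
        congr 1
        unfold pvCand
        rw [if_neg (by omega : ¬ (1:Int) ≤ n - 9^i)]
    · simp only [outerB]
      rw [if_neg hg, pvBest, dif_neg (by omega : ¬ (9:Int)^i ≤ n)]

-- ===== VERDICT (by name: the statement is the Claim_ definition above) =====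
theorem solve_spec : Claim_equal_solve := by
  intro n _
  unfold Spec_solve solve solve_alt
  show solveOuter n (n+2).toNat 0 n
      = outerB n (buildSix n (n+2).toNat 1) (n+2).toNat 1 0
          (((buildSix n (n+2).toNat 1).length : Int) - 1) n
  by_cases hn : (1:Int) ≤ n
  · set six := buildSix n (n+2).toNat 1 with hsix
    have hfuel : (n + 1 - 1).toNat < (n+2).toNat := by omega
    have hlen1 : 0 < six.length := by
      rw [hsix]
      obtain ⟨f, hf⟩ : ∃ f, (n+2).toNat = f + 1 := ⟨(n+2).toNat - 1, by omega⟩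
      rw [hf]
      simp only [buildSix]
      rw [if_pos hn]
      simp
    have h6 : ∀ k, k < six.length → six.getD k 0 = (6:Int)^k := by
      intro k hk
      have hg := buildSix_getD n (n+2).toNat k 1 (by norm_num) hfuel (by rw [← hsix]; exact hk)
      rw [← hsix] at hg
      rw [hg, one_mul]
    obtain ⟨hb1, hb2⟩ := buildSix_bounds n (n+2).toNat 1 (by norm_num) hfuel hn
    rw [← hsix] at hb1 hb2
    rw [one_mul] at hb1 hb2
    have hlog : pvJr n = six.length - 1 := by
      unfold pvJr
      apply Nat.log_eq_of_pow_le_of_lt_pow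
      · have hc : (((6:Nat)^(six.length - 1) : Nat) : Int) ≤ (n.toNat : Int) := by
          push_cast
          omega
        exact_mod_cast hc
      · have hL : six.length - 1 + 1 = six.length := by omega
        rw [hL]
        have hc : (n.toNat : Int) < (((6:Nat)^(six.length) : Nat) : Int) := by
          push_cast
          omega
        exact_mod_cast hc
    have hlen : ∀ r : Int, r ≤ n - 1 → 1 ≤ r → pvJr r < six.length := by
      intro r h1 h2
      have hm := pvJr_mono (show r ≤ n by omega)
      omega
    have hinv : pvJrI (n - 1) ≤ (six.length : Int) - 1 := by
      by_cases hr : (1:Int) ≤ n - 1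
      · have hm := pvJr_mono (show n - 1 ≤ n by omega)
        unfold pvJrI
        rw [if_pos hr]
        omega
      · unfold pvJrI
        rw [if_neg hr]
        omega
    rw [outerA_eval n (n+2).toNat 0 n (by simp only [pow_zero]; omega),
      outerB_eval n six h6 hlen (n+2).toNat 1 0 ((six.length : Int) - 1) n (by omega)
        (by norm_num) (by omega) (by omega) hinv]
  · have hA : solveOuter n (n+2).toNat 0 n = n := by
      cases hf : (n+2).toNat with
      | zero => simp only [solveOuter]
      | succ f =>
        simp only [solveOuter]
        rw [if_neg (by simp only [pow_zero]; omega : ¬ (9:Int)^0 ≤ n)]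
    rw [hA]
    cases hf : (n+2).toNat with
    | zero => simp only [outerB]
    | succ f =>
      simp only [outerB]
      rw [if_neg (by omega : ¬ (1:Int) ≤ n)]
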